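-- pv_equiv track=rewrite | github.com/KohakuBlueleaf/LyCORIS | lycoris/functional/general.py | power2factorization
-- ===== SOURCE A (Python) =====
-- def power2factorization(dimension: int, factor: int = -1) -> tuple[int, int]:
--     """
--     m = 2k
--     n = 2**p
--     m*n = dim
--     """
--     if factor == -1:
--         factor = dimension
--
--     # Find the first solution and check if it is even doable
--     m = n = 0
--     while m <= factor:
--         m += 2
--         while dimension % m != 0 and m < dimension:
--             m += 2
--         if m > factor:
--             break
--         if sum(int(i) for i in f"{dimension//m:b}") == 1:
--             n = dimension // m
--
--     if n == 0:
--         return None, n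
--     return dimension // n, n
-- ===== SOURCE B (Python) =====
-- def power2factorization(dimension: int, factor: int = -1) -> tuple[int, int]:
--     if factor == -1:
--         factor = dimension
--     if dimension <= 0 or factor < 2:
--         return None, 0
--     # scan n = 1, 2, 4, ... while dimension/n is still even (so m = dimension/n stays an even integer);
--     # dimension//n is decreasing, so the first n with dimension//n <= factor gives the largest valid m.
--     n = 1
--     while 0 < n < dimension and dimension % (2 * n) == 0:
--         if dimension // n <= factor:
--             return dimension // n, n
--         n *= 2
--     return None, 0
-- ===== Notes on version B (the rewrite author's own statement) =====
-- stated objective: faster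
-- what changed: Instead of scanning every even candidate m = 2,4,6,... up to factor and popcount-testing each quotient via binary string formatting, B scans the O(log dimension) powers of two n = 1,2,4,... while dimension/n stays even and returns at the first n with dimension//n <= factor (the quotient is decreasing, so the first hit is A's largest valid m).
import Mathlib
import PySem

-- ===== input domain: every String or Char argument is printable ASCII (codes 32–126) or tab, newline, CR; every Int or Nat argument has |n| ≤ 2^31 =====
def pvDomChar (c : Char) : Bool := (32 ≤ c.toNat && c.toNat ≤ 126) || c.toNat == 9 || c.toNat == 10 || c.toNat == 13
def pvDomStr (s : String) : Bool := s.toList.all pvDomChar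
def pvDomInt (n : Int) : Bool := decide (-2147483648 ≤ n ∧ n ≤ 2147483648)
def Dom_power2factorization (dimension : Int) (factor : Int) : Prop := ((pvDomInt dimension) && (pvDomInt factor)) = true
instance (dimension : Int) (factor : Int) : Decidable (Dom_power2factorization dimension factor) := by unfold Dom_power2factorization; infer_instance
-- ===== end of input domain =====

-- B replaces A's linear scan over all even candidates m ≤ factor by a scan over the powers of two
-- n = 1, 2, 4, ... (return values only; neither program mutates anything).

-- ===== PORT A =====
-- sum(int(i) for i in f"{q:b}"): digit sum of the binary representation of q; exact for q ≥ 0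
-- (for q < 0 Python raises ValueError on the '-' character — those inputs are excluded by Pre_).
def binDigitSum (q : Nat) : Nat :=
  if q = 0 then 0 else binDigitSum (q / 2) + q % 2
termination_by q
decreasing_by omega

-- inner while: `m += 2` while `dimension % m != 0 and m < dimension`, entered after the first `m += 2`
def innerA (dimension m : Int) : Int :=
  if PySem.Int.mod dimension m ≠ 0 ∧ m < dimension then innerA dimension (m + 2) else m
termination_by (dimension - m).toNat
decreasing_by omega

-- the inner loop only moves m upward (cited by outerA's decreasing_by)
theorem innerA_ge (dimension m : Int) : m ≤ innerA dimension m := by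
  fun_induction innerA with
  | case1 m h ih => omega
  | case2 m h => omega

-- outer while over the state (m, n); returns the final n
def outerA (dimension factor m n : Int) : Int :=
  if m ≤ factor then
    let m' := innerA dimension (m + 2)
    if m' > factor then n
    else outerA dimension factor m'
      (if binDigitSum (PySem.Int.floordiv dimension m').toNat = 1
       then PySem.Int.floordiv dimension m' else n)
  else n
termination_by (factor + 1 - m).toNat
decreasing_by have := innerA_ge dimension (m + 2); omega

def power2factorization (dimension : Int) (factor : Int) : Option Int × Int :=
  let f := if factor = -1 then dimension else factor
  let n := outerA dimension f 0 0
  if n = 0 then (none, n) else (some (PySem.Int.floordiv dimension n), n)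

-- ===== PORT B =====
-- while 0 < n < dimension and dimension % (2 * n) == 0: ...
def loopB (dimension factor n : Int) : Option Int × Int :=
  if 0 < n ∧ n < dimension ∧ PySem.Int.mod dimension (2 * n) = 0 then
    if PySem.Int.floordiv dimension n ≤ factor
    then (some (PySem.Int.floordiv dimension n), n)
    else loopB dimension factor (2 * n)
  else (none, 0)
termination_by (dimension - n).toNat
decreasing_by omega

def power2factorization_alt (dimension : Int) (factor : Int) : Option Int × Int :=
  let f := if factor = -1 then dimension else factor
  if dimension ≤ 0 ∨ f < 2 then (none, 0) else loopB dimension f 1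

-- ===== PRECONDITION & SPEC =====
-- Pre_ excludes exactly the inputs on which A raises ValueError: a negative dimension together with an
-- effective factor ≥ 2 makes A format a negative quotient in binary and call int() on its '-' sign.
def Pre_power2factorization (dimension : Int) (factor : Int) : Prop :=
  0 ≤ dimension ∨ factor < 2
instance (dimension : Int) (factor : Int) : Decidable (Pre_power2factorization dimension factor) := by
  unfold Pre_power2factorization; infer_instance

def pvWitness_power2factorization : Int × Int := (12, 8)

def Spec_power2factorization (dimension : Int) (factor : Int) (out : Option Int × Int) : Prop :=
  out = power2factorization_alt dimension factor
instance (dimension : Int) (factor : Int) (out : Option Int × Int) : Decidable (Spec_power2factorization dimension factor out) := by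
  unfold Spec_power2factorization; infer_instance

-- ===== CLAIM (what is proved, stated in full; the proofs are below) =====
def Claim_equal_power2factorization : Prop := ∀ (dimension : Int) (factor : Int), Dom_power2factorization dimension factor → Pre_power2factorization dimension factor → Spec_power2factorization dimension factor (power2factorization dimension factor)


-- ===== LEMMAS AND PROOFS =====

theorem binDigitSum_eq_zero (q : Nat) : binDigitSum q = 0 ↔ q = 0 := by
  fun_induction binDigitSum with
  | case1 => simp
  | case2 q h ih => simp only [Nat.add_eq_zero_iff, ih]; omega

theorem binDigitSum_eq_one (q : Nat) : binDigitSum q = 1 ↔ ∃ k : Nat, q = 2 ^ k := by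
  fun_induction binDigitSum with
  | case1 =>
    constructor
    · omega
    · rintro ⟨k, hk⟩; have := Nat.two_pow_pos k; omega
  | case2 q h ih =>
    by_cases hq2 : q % 2 = 0
    · rw [hq2, Nat.add_zero, ih]
      constructor
      · rintro ⟨k, hk⟩; exact ⟨k + 1, by rw [pow_succ]; omega⟩
      · rintro ⟨k, hk⟩
        cases k with
        | zero => simp at hk; omega
        | succ k => exact ⟨k, by rw [pow_succ] at hk; omega⟩
    · have hq1 : q % 2 = 1 := by omega
      rw [hq1]
      have hz := binDigitSum_eq_zero (q / 2)
      constructor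
      · intro hs
        have : q / 2 = 0 := hz.1 (by omega)
        exact ⟨0, by omega⟩
      · rintro ⟨k, hk⟩
        cases k with
        | zero => simp at hk
                  have : q / 2 = 0 := by omega
                  rw [hz.2 this]
        | succ k => exfalso; rw [pow_succ] at hk; omega

-- parity of the inner loop's stopping point
theorem innerA_parity (dimension m : Int) : 2 ∣ (innerA dimension m - m) := by
  fun_induction innerA with
  | case1 m h ih => omega
  | case2 m h => omega

-- the inner loop stops on a divisor or at/after dimension
theorem innerA_stop (dimension m : Int) :
    PySem.Int.mod dimension (innerA dimension m) = 0 ∨ dimension ≤ innerA dimension m := by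
  fun_induction innerA with
  | case1 m h ih => exact ih
  | case2 m h =>
    by_cases hz : PySem.Int.mod dimension m = 0
    · exact Or.inl hz
    · exact Or.inr (by omega)

-- positions the inner loop steps over (same parity as the start) are non-divisors
theorem innerA_skips (dimension m : Int) :
    ∀ u, m ≤ u → u < innerA dimension m → 2 ∣ (u - m) → PySem.Int.mod dimension u ≠ 0 := by
  fun_induction innerA with
  | case1 m h ih =>
    intro u h1 h2 h3
    rcases eq_or_lt_of_le h1 with rfl | hlt
    · exact h.1
    · exact ih u (by omega) h2 (by omega)
  | case2 m h => intro u h1 h2 h3; omega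

-- an even candidate A's outer scan, standing past position m, could still record: an even g in (m, f]
-- dividing dimension whose quotient passes A's popcount test
def Good (dimension f m g : Int) : Prop :=
  m < g ∧ g ≤ f ∧ 2 ∣ g ∧ PySem.Int.mod dimension g = 0 ∧
    binDigitSum (PySem.Int.floordiv dimension g).toNat = 1

theorem good_ge_inner (dimension f m g : Int) (hm : 2 ∣ m) (hg : Good dimension f m g) :
    innerA dimension (m + 2) ≤ g := by
  obtain ⟨h1, h2, h3, h4, h5⟩ := hg
  by_contra hlt
  exact innerA_skips dimension (m + 2) g (by omega) (by omega) (by omega) h4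

theorem outerA_char (dimension f : Int) (hd : 0 < dimension) (m n : Int) :
    2 ∣ m → 0 ≤ m →
    ((∀ g, ¬ Good dimension f m g) ∧ outerA dimension f m n = n) ∨
    (∃ g, Good dimension f m g ∧ (∀ g', Good dimension f m g' → g' ≤ g) ∧
      outerA dimension f m n = PySem.Int.floordiv dimension g) := by
  fun_induction outerA dimension f m n with
  | case1 m n h1 m' h2 =>
    intro hm _
    have hm'def : m' = innerA dimension (m + 2) := rfl
    refine Or.inl ⟨fun g hg => ?_, rfl⟩
    have hge := good_ge_inner dimension f m g hm hg
    obtain ⟨hga, hgb, -, -, -⟩ := hg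
    rw [← hm'def] at hge
    omega
  | case2 m n h1 m' h2 ih =>
    intro hm hm0
    have hm'def : m' = innerA dimension (m + 2) := rfl
    have hIge : m + 2 ≤ m' := hm'def ▸ innerA_ge dimension (m + 2)
    have hIpar : 2 ∣ (m' - (m + 2)) := hm'def ▸ innerA_parity dimension (m + 2)
    have hI2 : 2 ∣ m' := by omega
    have hIf : m' ≤ f := by omega
    have trans1 : ∀ g, Good dimension f m' g → Good dimension f m g := by
      intro g hg
      exact ⟨by have := hg.1; omega, hg.2.1, hg.2.2.1, hg.2.2.2.1, hg.2.2.2.2⟩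
    have trans2 : ∀ g, Good dimension f m g → g = m' ∨ Good dimension f m' g := by
      intro g hg
      have := hm'def ▸ good_ge_inner dimension f m g hm hg
      rcases eq_or_lt_of_le this with h | h
      · exact Or.inl h.symm
      · exact Or.inr ⟨h, hg.2.1, hg.2.2.1, hg.2.2.2.1, hg.2.2.2.2⟩
    rcases ih hI2 (by omega) with ⟨hnone, heq⟩ | ⟨g, hg, hmax, heq⟩
    · simp only [dite_eq_ite] at heq
      by_cases hup : binDigitSum (PySem.Int.floordiv dimension m').toNat = 1
      · by_cases hmod : PySem.Int.mod dimension m' = 0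
        · have hgood : Good dimension f m m' := ⟨by omega, hIf, hI2, hmod, hup⟩
          refine Or.inr ⟨m', hgood, ?_, ?_⟩
          · intro g' hg'
            rcases trans2 g' hg' with rfl | hg'I
            · exact le_refl _
            · exact absurd hg'I (hnone g')
          · rw [heq, if_pos hup]
        · exfalso
          have hge : dimension ≤ m' := by
            rcases hm'def ▸ innerA_stop dimension (m + 2) with h | h
            · exact absurd h hmod
            · exact h
          have hlt : dimension < m' := by
            rcases eq_or_lt_of_le hge with h | h
            · exact absurd (h ▸ (PySem.Int.mod_eq_zero_iff_dvd dimension dimension).2 dvd_rfl) hmod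
            · exact h
          have h0 : PySem.Int.floordiv dimension m' = 0 := by
            rw [PySem.Int.floordiv_eq_ediv_of_pos (by omega : (0:Int) < m')]
            exact Int.ediv_eq_zero_of_lt (by omega) hlt
          rw [h0] at hup
          simp only [Int.toNat_zero] at hup
          have hbz : binDigitSum 0 = 0 := (binDigitSum_eq_zero 0).2 rfl
          omega
      · refine Or.inl ⟨fun g hg => ?_, by rw [heq, if_neg hup]⟩
        rcases trans2 g hg with rfl | hgI
        · exact hup hg.2.2.2.2
        · exact hnone g hgI
    · simp only [dite_eq_ite] at heq
      refine Or.inr ⟨g, trans1 g hg, ?_, heq⟩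
      intro g' hg'
      rcases trans2 g' hg' with rfl | hg'I
      · exact le_of_lt hg.1
      · exact hmax g' hg'I
  | case3 m n h1 =>
    intro _ _
    exact Or.inl ⟨fun g hg => by have := hg.1; have := hg.2.1; omega, rfl⟩

-- every Good candidate is dimension / 2^k for a power 2^k whose double still divides dimension
theorem good_pow (dimension f g : Int) (hd : 0 < dimension) (hg : Good dimension f 0 g) :
    ∃ k : Nat, PySem.Int.floordiv dimension g = 2 ^ k ∧ dimension = g * 2 ^ k ∧
      (2 : Int) ^ (k + 1) ∣ dimension := by
  obtain ⟨hg0, hgf, hg2, hmod, hbds⟩ := hg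
  have hdvd : g ∣ dimension := (PySem.Int.mod_eq_zero_iff_dvd dimension g).1 hmod
  have hfd : PySem.Int.floordiv dimension g = dimension / g :=
    PySem.Int.floordiv_eq_ediv_of_pos (by omega)
  have hnn : 0 ≤ dimension / g := Int.ediv_nonneg (by omega) (by omega)
  obtain ⟨k, hk⟩ := (binDigitSum_eq_one _).1 hbds
  have hpow : PySem.Int.floordiv dimension g = (2 : Int) ^ k := by
    have h1 : ((PySem.Int.floordiv dimension g).toNat : Int) = PySem.Int.floordiv dimension g := by
      rw [hfd]; exact Int.toNat_of_nonneg hnn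
    rw [← h1, hk]; push_cast; ring
  have hdim : dimension = g * 2 ^ k := by
    have h2 : dimension / g * g = dimension := Int.ediv_mul_cancel hdvd
    rw [hfd] at hpow
    rw [← h2, hpow]; ring
  obtain ⟨t, ht⟩ := hg2
  exact ⟨k, hpow, hdim, ⟨t, by rw [hdim, ht, pow_succ]; ring⟩⟩

theorem no_good (dimension f : Int) (hd : 0 < dimension) (j : Nat)
    (hinv : ∀ k : Nat, k < j → f < PySem.Int.floordiv dimension (2 ^ k))
    (hnd : ¬ (2 : Int) ^ (j + 1) ∣ dimension) : ∀ g, ¬ Good dimension f 0 g := by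
  intro g hg
  obtain ⟨k, hk1, hk2, hk3⟩ := good_pow dimension f g hd hg
  by_cases hkj : k < j
  · have hfl : PySem.Int.floordiv dimension (2 ^ k) = g := by
      rw [PySem.Int.floordiv_eq_ediv_of_pos (by positivity), hk2]
      exact Int.mul_ediv_cancel g (by positivity)
    have h1 := hinv k hkj
    have h2 := hg.2.1
    rw [hfl] at h1
    omega
  · exact hnd ((pow_dvd_pow 2 (by omega : j + 1 ≤ k + 1)).trans hk3)

theorem loopB_char (dimension f : Int) (hd : 0 < dimension) :
    ∀ (fuel j : Nat), dimension.toNat ≤ j + fuel → (2 : Int) ^ j ∣ dimension →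
    (∀ k : Nat, k < j → f < PySem.Int.floordiv dimension (2 ^ k)) →
    ((∀ g, ¬ Good dimension f 0 g) ∧ loopB dimension f (2 ^ j) = (none, 0)) ∨
    (∃ g, Good dimension f 0 g ∧ (∀ g', Good dimension f 0 g' → g' ≤ g) ∧
      loopB dimension f (2 ^ j) = (some g, PySem.Int.floordiv dimension g)) := by
  intro fuel
  induction fuel with
  | zero =>
    intro j hfu hdvd hinv
    have hjd : (dimension : Int) ≤ 2 ^ j := by
      have h1 : dimension.toNat < 2 ^ dimension.toNat := Nat.lt_two_pow_self
      have h2 : (2:Nat) ^ dimension.toNat ≤ 2 ^ j := Nat.pow_le_pow_right (by omega) (by omega)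
      have h3 : (dimension.toNat : Int) < (((2:Nat) ^ j : Nat) : Int) := by
        exact_mod_cast lt_of_lt_of_le h1 h2
      push_cast at h3
      omega
    have hnd : ¬ (2 : Int) ^ (j + 1) ∣ dimension := by
      intro h
      have hle := Int.le_of_dvd hd h
      rw [pow_succ] at hle
      have hp : (0:Int) < 2 ^ j := by positivity
      omega
    refine Or.inl ⟨no_good dimension f hd j hinv hnd, ?_⟩
    rw [loopB.eq_def, if_neg (by omega)]
  | succ fuel ih =>
    intro j hfu hdvd hinv
    rw [loopB.eq_def]
    have hp : (0:Int) < 2 ^ j := by positivity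
    have hmodiff : PySem.Int.mod dimension (2 * 2 ^ j) = 0 ↔ (2:Int) ^ (j+1) ∣ dimension := by
      rw [PySem.Int.mod_eq_zero_iff_dvd, pow_succ']
    split_ifs with h1 h2
    · -- success: return (some (dimension // 2^j), 2^j)
      obtain ⟨-, hlt, hmod⟩ := h1
      obtain ⟨t, ht⟩ := hmodiff.1 hmod
      set g := PySem.Int.floordiv dimension (2 ^ j) with hgdef
      have hfd : g = dimension / 2 ^ j := PySem.Int.floordiv_eq_ediv_of_pos hp
      have hsplit : dimension = 2 ^ j * (2 * t) := by rw [ht, pow_succ]; ring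
      have hgval : g = 2 * t := by
        rw [hfd, hsplit, Int.mul_ediv_cancel_left _ (by positivity : ((2:Int)^j) ≠ 0)]
      have hgdim : dimension = g * 2 ^ j := by rw [hgval, hsplit]; ring
      have hg0 : 0 < g := by
        have hp1 : (0:Int) < 2 ^ (j+1) := by positivity
        have ht0 : 0 < t := by nlinarith [ht]
        omega
      have hfg : PySem.Int.floordiv dimension g = 2 ^ j := by
        rw [PySem.Int.floordiv_eq_ediv_of_pos hg0, hgdim,
          Int.mul_ediv_cancel_left _ (by omega : g ≠ 0)]
      have hgood : Good dimension f 0 g := by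
        refine ⟨hg0, h2, ⟨t, hgval⟩, ?_, ?_⟩
        · exact (PySem.Int.mod_eq_zero_iff_dvd dimension g).2 ⟨2 ^ j, hgdim⟩
        · have hcast : ((2:Int) ^ j).toNat = 2 ^ j := by
            rw [show ((2:Int) ^ j) = (((2:Nat) ^ j : Nat) : Int) by push_cast; ring,
              Int.toNat_natCast]
          rw [hfg, hcast]
          exact (binDigitSum_eq_one _).2 ⟨j, rfl⟩
      refine Or.inr ⟨g, hgood, ?_, by rw [hfg]⟩
      intro g' hg'
      obtain ⟨k, hk1, hk2, hk3⟩ := good_pow dimension f g' hd hg'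
      have hg'0 : 0 < g' := hg'.1
      by_cases hkj : k < j
      · exfalso
        have hfl : PySem.Int.floordiv dimension (2 ^ k) = g' := by
          rw [PySem.Int.floordiv_eq_ediv_of_pos (by positivity), hk2]
          exact Int.mul_ediv_cancel g' (by positivity)
        have ha := hinv k hkj
        have hb := hg'.2.1
        rw [hfl] at ha
        omega
      · have hple : (2:Int) ^ j ≤ 2 ^ k := pow_le_pow_right₀ (by omega) (by omega)
        have h5 : g' * 2 ^ j ≤ g' * 2 ^ k := by
          exact mul_le_mul_of_nonneg_left hple (by omega)
        have h6 : g' * 2 ^ k = g * 2 ^ j := by rw [← hk2, hgdim]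
        have h7 : g' * 2 ^ j ≤ g * 2 ^ j := by omega
        exact le_of_mul_le_mul_right h7 hp
    · -- continue with n = 2 * 2^j = 2^(j+1)
      obtain ⟨-, hlt, hmod⟩ := h1
      have hdvd1 : (2:Int) ^ (j+1) ∣ dimension := hmodiff.1 hmod
      have hrec : 2 * (2:Int) ^ j = 2 ^ (j + 1) := (pow_succ' 2 j).symm
      rw [hrec]
      refine ih (j + 1) (by omega) hdvd1 ?_
      intro k hk
      rcases Nat.lt_succ_iff_lt_or_eq.1 hk with h | rfl
      · exact hinv k h
      · omega
    · -- guard false: no larger power of two divides, nothing Good exists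
      have hnd : ¬ (2 : Int) ^ (j + 1) ∣ dimension := by
        intro hcon
        apply h1
        refine ⟨hp, ?_, hmodiff.2 hcon⟩
        have hle := Int.le_of_dvd hd hcon
        rw [pow_succ] at hle
        omega
      exact Or.inl ⟨no_good dimension f hd j hinv hnd, rfl⟩

-- A's scan records nothing when dimension = 0: every quotient is 0 and fails the popcount test
theorem outerA_zero (f m n : Int) : outerA 0 f m n = n := by
  fun_induction outerA 0 f m n with
  | case1 m n h1 m' h2 => rfl
  | case2 m n h1 m' h2 ih =>
    have h0 : PySem.Int.floordiv 0 m' = 0 := by simp [PySem.Int.floordiv]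
    have hb : binDigitSum 0 = 0 := (binDigitSum_eq_zero 0).2 rfl
    exact ih.trans (by simp [h0, hb])
  | case3 m n h1 => rfl

-- ===== VERDICT (by name: the statement is the Claim_ definition above) =====
theorem power2factorization_spec : Claim_equal_power2factorization := by
  unfold Claim_equal_power2factorization
  intro d fa hdom hpre
  unfold Spec_power2factorization
  simp only [power2factorization, power2factorization_alt]
  set f := if fa = -1 then d else fa with hf
  by_cases hf2 : f < 2
  · -- effective factor below 2: A breaks out with n = 0, B returns (none, 0) at the guard
    have hout : outerA d f 0 0 = 0 := by
      rw [outerA.eq_def]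
      have hbig : f < innerA d 2 := by have := innerA_ge d 2; omega
      simp [hbig]
    rw [if_pos (Or.inr hf2)]
    simp [hout]
  · replace hf2 : 2 ≤ f := by omega
    rcases lt_trichotomy d 0 with hneg | hzero | hpos
    · exfalso
      unfold Pre_power2factorization at hpre
      by_cases hfa : fa = -1
      · rw [hfa, if_pos rfl] at hf; omega
      · rw [if_neg hfa] at hf; omega
    · -- dimension = 0 with factor ≥ 2: A's scan never records, B's guard fires
      have hout : outerA d f 0 0 = 0 := by rw [hzero]; exact outerA_zero f 0 0
      rw [if_pos (Or.inl (by omega))]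
      simp [hout]
    · -- main case: dimension > 0, effective factor ≥ 2
      rw [if_neg (by omega : ¬ (d ≤ 0 ∨ f < 2))]
      have hA := outerA_char d f hpos 0 0 (dvd_zero 2) (le_refl 0)
      have hB := loopB_char d f hpos d.toNat 0 (by omega)
        (by rw [pow_zero]; exact one_dvd d) (by intro k hk; omega)
      rw [pow_zero] at hB
      rcases hA with ⟨hnoneA, heqA⟩ | ⟨g1, hg1, hmax1, heqA⟩
      · rcases hB with ⟨-, heqB⟩ | ⟨g2, hg2, -, -⟩
        · simp [heqA, heqB]
        · exact absurd hg2 (hnoneA g2)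
      · rcases hB with ⟨hnoneB, -⟩ | ⟨g2, hg2, hmax2, heqB⟩
        · exact absurd hg1 (hnoneB g1)
        · have hgg : g1 = g2 := le_antisymm (hmax2 g1 hg1) (hmax1 g2 hg2)
          rw [← hgg] at heqB
          obtain ⟨hgpos, hgf, hg2dvd, hgmod, hgbds⟩ := hg1
          have hdvd : g1 ∣ d := (PySem.Int.mod_eq_zero_iff_dvd d g1).1 hgmod
          have hfd : PySem.Int.floordiv d g1 = d / g1 :=
            PySem.Int.floordiv_eq_ediv_of_pos (by omega)
          obtain ⟨t, ht⟩ := hdvd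
          have htval : d / g1 = t := by rw [ht, Int.mul_ediv_cancel_left _ (by omega : g1 ≠ 0)]
          have ht0 : 0 < t := by nlinarith
          have hne : PySem.Int.floordiv d g1 ≠ 0 := by rw [hfd, htval]; omega
          have hgg2 : PySem.Int.floordiv d (PySem.Int.floordiv d g1) = g1 := by
            rw [hfd, htval, PySem.Int.floordiv_eq_ediv_of_pos ht0, ht,
              Int.mul_ediv_cancel _ (by omega : t ≠ 0)]
          rw [heqA, heqB, if_neg hne, hgg2]
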